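-- pv_equiv track=rewrite | github.com/prefix-dev/pixi-build-backends | crates/pixi-build-r/collect_system_requirements.py | parse_packages_db
-- ===== SOURCE A (Python) =====
-- def parse_packages_db(content: str) -> list[dict]:
--     """Parse PACKAGES file in DCF format."""
--     packages = []
--     current = {}
--     current_key = None
--     current_value = ""
--
--     for line in content.split("\n"):
--         # Empty line marks end of package entry
--         if not line.strip():
--             if current_key and current_value:
--                 current[current_key] = current_value.strip()
--             if current:
--                 packages.append(current)
--             current = {}
--             current_key = None
--             current_value = ""
--             continue
--
--         # Continuation line (starts with whitespace)
--         if line.startswith(" ") or line.startswith("\t"):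
--             if current_key:
--                 current_value += " " + line.strip()
--         elif ":" in line:
--             # Save previous field
--             if current_key:
--                 current[current_key] = current_value.strip()
--
--             colon_pos = line.index(":")
--             current_key = line[:colon_pos].strip()
--             current_value = line[colon_pos + 1 :].strip()
--
--     # Don't forget last entry
--     if current_key and current_value:
--         current[current_key] = current_value.strip()
--     if current:
--         packages.append(current)
--
--     return packages
-- ===== SOURCE B (Python) =====
-- def _parse_block(lines):
--     """Parse one blank-line-delimited DCF record (nonblank lines) into a dict."""
--     fields = {}
--     key = ""
--     value = ""
--     for line in lines:
--         if line.startswith(" ") or line.startswith("\t"):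
--             if key:
--                 value += " " + line.strip()
--         else:
--             head, sep, tail = line.partition(":")
--             if sep:
--                 if key:
--                     fields[key] = value.strip()
--                 key = head.strip()
--                 value = tail.strip()
--     if key and value:
--         fields[key] = value.strip()
--     return fields
--
--
-- def parse_packages_db(content: str) -> list[dict]:
--     """Parse PACKAGES file in DCF format."""
--     packages = []
--     block = []
--     for line in content.split("\n") + [""]:
--         if line.strip():
--             block.append(line)
--         elif block:
--             fields = _parse_block(block)
--             if fields:
--                 packages.append(fields)
--             block = []
--     return packages
-- ===== Notes on version B (the rewrite author's own statement) =====
-- stated objective: alternative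
-- what changed: Replaces A's single stateful line loop (dict, current_key, current_value, mid-loop record flush) with a two-phase decomposition: group lines into blank-line-delimited blocks with a sentinel trailing blank line, then parse each block independently with a helper based on str.partition instead of substring search plus index and slicing.
import Mathlib
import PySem

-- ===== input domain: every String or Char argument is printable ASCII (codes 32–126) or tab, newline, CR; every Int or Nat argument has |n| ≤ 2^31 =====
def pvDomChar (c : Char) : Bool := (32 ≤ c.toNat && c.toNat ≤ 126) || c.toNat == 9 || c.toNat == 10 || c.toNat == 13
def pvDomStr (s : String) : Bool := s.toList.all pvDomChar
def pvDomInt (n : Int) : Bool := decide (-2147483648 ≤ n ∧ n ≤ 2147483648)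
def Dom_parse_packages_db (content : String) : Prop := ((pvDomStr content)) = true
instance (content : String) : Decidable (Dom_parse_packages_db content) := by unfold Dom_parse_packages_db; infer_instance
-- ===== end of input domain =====

-- B re-decomposes A's single stateful loop into two passes (group lines into blank-line-delimited
-- blocks, then parse each block with str.partition); objective: alternative decomposition, same cost.

-- ===== PORT A =====
-- Python truthiness of current_key (None or a string)
def pvTruthy : Option String → Bool
  | none => false
  | some k => k != ""

def pvAStep : List (List (String × String)) × PySem.Dict String String × Option String × String →
    String → List (List (String × String)) × PySem.Dict String String × Option String × String
  | (pkgs, cur, ck, cv), line =>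
    if PySem.Str.strip line == "" then
      let cur' := if pvTruthy ck && (cv != "") then cur.insert (ck.getD "") (PySem.Str.strip cv) else cur
      let pkgs' := if cur'.items.isEmpty then pkgs else pkgs ++ [cur'.items]
      (pkgs', PySem.Dict.empty, none, "")
    else if PySem.Str.startswith line " " || PySem.Str.startswith line "\t" then
      (pkgs, cur, ck, if pvTruthy ck then cv ++ " " ++ PySem.Str.strip line else cv)
    else if PySem.Str.isIn ":" line then
      let cur' := if pvTruthy ck then cur.insert (ck.getD "") (PySem.Str.strip cv) else cur
      let pos := PySem.Str.find line ":"
      (pkgs, cur', some (PySem.Str.strip (PySem.Str.slice line none (some pos))),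
        PySem.Str.strip (PySem.Str.slice line (some (pos + 1)) none))
    else (pkgs, cur, ck, cv)

-- the trailing "don't forget last entry" flush
def pvAFinish : List (List (String × String)) × PySem.Dict String String × Option String × String →
    List (List (String × String))
  | (pkgs, cur, ck, cv) =>
    let cur' := if pvTruthy ck && (cv != "") then cur.insert (ck.getD "") (PySem.Str.strip cv) else cur
    if cur'.items.isEmpty then pkgs else pkgs ++ [cur'.items]

def parse_packages_db (content : String) : List (List (String × String)) :=
  pvAFinish (((PySem.Str.split? content "\n").getD []).foldl pvAStep ([], PySem.Dict.empty, none, ""))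

-- ===== PORT B =====
def pvBlockStep : PySem.Dict String String × String × String → String →
    PySem.Dict String String × String × String
  | (d, key, val), line =>
    if PySem.Str.startswith line " " || PySem.Str.startswith line "\t" then
      (d, key, if key != "" then val ++ " " ++ PySem.Str.strip line else val)
    else
      -- head, sep, tail = line.partition(":"): ported by hand via the first occurrence
      -- (exact: partition splits at find; sep nonempty iff find ≥ 0)
      let pos := PySem.Str.find line ":"
      if pos ≥ 0 then
        let d' := if key != "" then d.insert key (PySem.Str.strip val) else d
        (d', PySem.Str.strip (PySem.Str.slice line none (some pos)),
          PySem.Str.strip (PySem.Str.slice line (some (pos + 1)) none))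
      else (d, key, val)

def pvParseBlock (lines : List String) : List (String × String) :=
  match lines.foldl pvBlockStep (PySem.Dict.empty, "", "") with
  | (d, key, val) =>
    let d' := if key != "" && val != "" then d.insert key (PySem.Str.strip val) else d
    d'.items

def pvBStep : List (List (String × String)) × List String → String →
    List (List (String × String)) × List String
  | (pkgs, block), line =>
    if PySem.Str.strip line != "" then (pkgs, block ++ [line])
    else if block.isEmpty then (pkgs, block)
    else
      let fields := pvParseBlock block
      ((if fields.isEmpty then pkgs else pkgs ++ [fields]), [])

def parse_packages_db_alt (content : String) : List (List (String × String)) :=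
  ((((PySem.Str.split? content "\n").getD []) ++ [""]).foldl pvBStep ([], [])).1

-- ===== PRECONDITION & SPEC =====
def Spec_parse_packages_db (content : String) (out : List (List (String × String))) : Prop := out = parse_packages_db_alt content
instance (content : String) (out : List (List (String × String))) : Decidable (Spec_parse_packages_db content out) := by unfold Spec_parse_packages_db; infer_instance

-- ===== CLAIM (what is proved, stated in full; the proofs are below) =====
def Claim_equal_parse_packages_db : Prop := ∀ (content : String), Dom_parse_packages_db content → Spec_parse_packages_db content (parse_packages_db content)

-- ===== LEMMAS AND PROOFS =====
def pvOpt (ck : Option String) : String := ck.getD ""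

theorem pvTruthy_eq (ck : Option String) : pvTruthy ck = (pvOpt ck != "") := by
  cases ck <;> simp [pvTruthy, pvOpt]

-- on a blank line, B's block flush computes exactly A's end-of-record flush
-- on a blank line, B's block flush computes exactly A's end-of-record flush
theorem pv_blank (line : String) (h0 : (PySem.Str.strip line == "") = true)
    (pkgs : List (List (String × String))) (cur : PySem.Dict String String)
    (ck : Option String) (cv : String) (block : List String)
    (hinv : block.foldl pvBlockStep (PySem.Dict.empty, "", "") = (cur, pvOpt ck, cv)) :
    pvBStep (pkgs, block) line = (pvAFinish (pkgs, cur, ck, cv), []) := by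
  by_cases hb : block = []
  · subst hb
    simp only [List.foldl_nil, Prod.mk.injEq] at hinv
    obtain ⟨h1, h2, h3⟩ := hinv
    subst h1; subst h3
    simp [pvBStep, pvAFinish, bne, h0, pvTruthy_eq, ← h2, PySem.Dict.empty]
  · have hb' : block.isEmpty = false := by simpa [List.isEmpty_iff] using hb
    simp [pvBStep, bne, h0, hb', pvParseBlock, hinv, pvAFinish, pvTruthy_eq, pvOpt]

theorem pv_loop_eq : ∀ (lines : List String) (pkgs : List (List (String × String)))
    (cur : PySem.Dict String String) (ck : Option String) (cv : String) (block : List String),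
    block.foldl pvBlockStep (PySem.Dict.empty, "", "") = (cur, pvOpt ck, cv) →
    pvAFinish (lines.foldl pvAStep (pkgs, cur, ck, cv))
      = ((lines ++ [""]).foldl pvBStep (pkgs, block)).1 := by
  intro lines
  induction lines with
  | nil =>
    intro pkgs cur ck cv block hinv
    have h0 : (PySem.Str.strip "" == "") = true := by decide
    simp only [List.foldl_nil, List.nil_append, List.foldl_cons,
      pv_blank "" h0 pkgs cur ck cv block hinv]
  | cons line rest ih =>
    intro pkgs cur ck cv block hinv
    by_cases h0 : (PySem.Str.strip line == "") = true
    · -- blank line: both sides flush the current record and reset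
      have hA : pvAStep (pkgs, cur, ck, cv) line
          = (pvAFinish (pkgs, cur, ck, cv), PySem.Dict.empty, none, "") := by
        simp [pvAStep, pvAFinish, h0]
      rw [List.cons_append, List.foldl_cons, List.foldl_cons, hA,
        pv_blank line h0 pkgs cur ck cv block hinv]
      exact ih _ _ _ _ [] rfl
    · rw [Bool.not_eq_true] at h0
      have hB : pvBStep (pkgs, block) line = (pkgs, block ++ [line]) := by
        simp [pvBStep, bne, h0]
      rw [List.cons_append, List.foldl_cons, List.foldl_cons, hB]
      by_cases h1 : (PySem.Chars.startswith line.toList [' '] = true ∨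
          PySem.Chars.startswith line.toList ['\t'] = true)
      · -- continuation line
        have hA : pvAStep (pkgs, cur, ck, cv) line
            = (pkgs, cur, ck, if pvTruthy ck then cv ++ " " ++ PySem.Str.strip line else cv) := by
          simp [pvAStep, h0, h1]
        rw [hA]
        apply ih
        rw [List.foldl_append, hinv]
        simp [pvBlockStep, h1, pvTruthy_eq]
      · by_cases h2 : PySem.Chars.isIn [':'] line.toList = true
        · -- key: value line
          have hpos : (0 : Int) ≤ PySem.Chars.find line.toList [':'] :=
            (PySem.Chars.find_nonneg_iff line.toList [':']).mpr
              ((PySem.Chars.isIn_iff_infix [':'] line.toList).mp h2)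
          have hA : pvAStep (pkgs, cur, ck, cv) line
              = (pkgs, (if pvTruthy ck then cur.insert (ck.getD "") (PySem.Str.strip cv) else cur),
                 some (PySem.Str.strip (PySem.Str.slice line none (some (PySem.Str.find line ":")))),
                 PySem.Str.strip (PySem.Str.slice line (some (PySem.Str.find line ":" + 1)) none)) := by
            simp [pvAStep, h0, h1, h2]
          rw [hA]
          apply ih
          rw [List.foldl_append, hinv]
          simp [pvBlockStep, h1, hpos, pvTruthy_eq, pvOpt]
        · -- colonless line: both sides ignore it
          rw [Bool.not_eq_true] at h2
          have hfind : PySem.Chars.find line.toList [':'] = -1 :=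
            (PySem.Chars.find_eq_neg_one_iff line.toList [':']).mpr
              ((PySem.Chars.isIn_eq_false_iff [':'] line.toList).mp h2)
          have hA : pvAStep (pkgs, cur, ck, cv) line = (pkgs, cur, ck, cv) := by
            simp [pvAStep, h0, h1, h2]
          rw [hA]
          apply ih
          rw [List.foldl_append, hinv]
          simp [pvBlockStep, h1, hfind]

theorem pv_main (content : String) : parse_packages_db content = parse_packages_db_alt content := by
  unfold parse_packages_db parse_packages_db_alt
  exact pv_loop_eq _ _ _ none "" [] rfl

-- ===== VERDICT (by name: the statement is the Claim_ definition above) =====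
theorem parse_packages_db_spec : Claim_equal_parse_packages_db := by
  intro content _
  unfold Spec_parse_packages_db
  exact pv_main content
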